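-- pv_equiv track=rewrite | github.com/widelands/widelands | cmake/codecheck/rules/include_algorithm_for_sort.py | does_include_algorithm
-- ===== SOURCE A (Python) =====
-- def does_include_algorithm(lines, fn):
--     includes_algorithm = False
--     for lineno, line in enumerate(lines, 1):
--         if "include <algorithm>" in line:
--             includes_algorithm = True
--
--         if "std::sort" in line and not includes_algorithm:
--             return [ (fn, lineno,
--                 "This file uses std::sort but does not include <algorithm>.") ]
--     return []
-- ===== SOURCE B (Python) =====
-- def does_include_algorithm(lines, fn):
--     first_sort = next((i for i, line in enumerate(lines, 1) if "std::sort" in line), None)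
--     first_include = next((i for i, line in enumerate(lines, 1) if "include <algorithm>" in line), None)
--     if first_sort is not None and (first_include is None or first_sort < first_include):
--         return [(fn, first_sort,
--             "This file uses std::sort but does not include <algorithm>.")]
--     return []
-- ===== Notes on version B (the rewrite author's own statement) =====
-- stated objective: simpler
-- what changed: Replaces A's single stateful scan with a boolean flag and early return by two independent first-occurrence line-number computations (next over enumerate) compared with a strict '<'.
import Mathlib
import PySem

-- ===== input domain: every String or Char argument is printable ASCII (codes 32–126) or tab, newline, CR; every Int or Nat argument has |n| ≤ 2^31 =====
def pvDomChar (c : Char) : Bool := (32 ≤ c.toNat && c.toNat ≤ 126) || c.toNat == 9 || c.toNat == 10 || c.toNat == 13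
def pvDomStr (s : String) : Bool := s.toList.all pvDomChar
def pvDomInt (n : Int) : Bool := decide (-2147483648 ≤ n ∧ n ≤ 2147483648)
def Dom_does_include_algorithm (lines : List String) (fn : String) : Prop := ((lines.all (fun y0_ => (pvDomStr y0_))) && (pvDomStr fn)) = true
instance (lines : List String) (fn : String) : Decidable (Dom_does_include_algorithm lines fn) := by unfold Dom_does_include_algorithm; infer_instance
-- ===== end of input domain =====

-- B replaces A's stateful flag-and-early-return scan by two first-occurrence line numbers compared with '<' (objective: simpler).

def pvMsg : String := "This file uses std::sort but does not include <algorithm>."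

-- ===== PORT A =====
-- the enumerate(lines, 1) loop carrying the includes_algorithm flag
def pvGoA (fn : String) : List String → Int → Bool → List (String × Int × String)
  | [], _, _ => []
  | line :: rest, lineno, inc =>
    let inc := inc || PySem.Str.isIn "include <algorithm>" line
    if PySem.Str.isIn "std::sort" line && !inc then
      [(fn, lineno, pvMsg)]
    else
      pvGoA fn rest (lineno + 1) inc

def does_include_algorithm (lines : List String) (fn : String) : List (String × Int × String) :=
  pvGoA fn lines 1 false

-- ===== PORT B =====
-- first_sort / first_include as 1-based line numbers (next over enumerate)
def pvFirst (sub : String) (lines : List String) : Option Int :=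
  (lines.findIdx? (fun line => PySem.Str.isIn sub line)).map (fun i => (i : Int) + 1)

def does_include_algorithm_alt (lines : List String) (fn : String) : List (String × Int × String) :=
  match pvFirst "std::sort" lines, pvFirst "include <algorithm>" lines with
  | some s, none => [(fn, s, pvMsg)]
  | some s, some i => if s < i then [(fn, s, pvMsg)] else []
  | none, _ => []

-- ===== PRECONDITION & SPEC =====
def Spec_does_include_algorithm (lines : List String) (fn : String) (out : List (String × Int × String)) : Prop := out = does_include_algorithm_alt lines fn
instance (lines : List String) (fn : String) (out : List (String × Int × String)) : Decidable (Spec_does_include_algorithm lines fn out) := by unfold Spec_does_include_algorithm; infer_instance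

-- ===== CLAIM (what is proved, stated in full; the proofs are below) =====
def Claim_equal_does_include_algorithm : Prop := ∀ (lines : List String) (fn : String), Dom_does_include_algorithm lines fn → Spec_does_include_algorithm lines fn (does_include_algorithm lines fn)

-- ===== LEMMAS AND PROOFS =====

-- once the flag is set, A can never return an error
theorem pvGoA_true (fn : String) (lines : List String) (n : Int) :
    pvGoA fn lines n true = [] := by
  induction lines generalizing n with
  | nil => rfl
  | cons l rest ih => simp [pvGoA, ih]

theorem pvFirst_cons (sub : String) (l : String) (rest : List String) :
    pvFirst sub (l :: rest) =
      if PySem.Str.isIn sub l then some 1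
      else (pvFirst sub rest).map (· + 1) := by
  simp only [pvFirst, List.findIdx?_cons]
  split
  · rfl
  · cases h : rest.findIdx? (fun line => PySem.Str.isIn sub line) with
    | none => simp [h]
    | some i => simp [h]

theorem pvFirst_pos (sub : String) (lines : List String) (s : Int)
    (h : pvFirst sub lines = some s) : 1 ≤ s := by
  unfold pvFirst at h
  cases k : lines.findIdx? (fun line => PySem.Str.isIn sub line) with
  | none => rw [k] at h; simp at h
  | some j => rw [k] at h; simp at h; omega

-- the scan with flag false, at any starting line number, equals B's comparison shifted
theorem pvGoA_false (fn : String) (lines : List String) (n : Int) :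
    pvGoA fn lines n false =
      match pvFirst "std::sort" lines, pvFirst "include <algorithm>" lines with
      | some s, none => [(fn, n + s - 1, pvMsg)]
      | some s, some i => if s < i then [(fn, n + s - 1, pvMsg)] else []
      | none, _ => [] := by
  induction lines generalizing n with
  | nil => rfl
  | cons l rest ih =>
    rw [pvFirst_cons, pvFirst_cons]
    by_cases hi : PySem.Chars.isIn "include <algorithm>".toList l.toList <;>
      by_cases hs : PySem.Chars.isIn "std::sort".toList l.toList <;>
        simp at hi hs
    · simp [pvGoA, hi, hs, pvGoA_true]
    · cases hr : pvFirst "std::sort" rest with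
      | none => simp [pvGoA, hi, hs, pvGoA_true, hr]
      | some j =>
        have hj := pvFirst_pos _ _ _ hr
        simp [pvGoA, hi, hs, pvGoA_true, hr, (by omega : ¬ (j + 1 < (1:Int)))]
        omega
    · cases hr : pvFirst "include <algorithm>" rest with
      | none =>
        simp [pvGoA, hi, hs, hr]
      | some i =>
        have hi1 := pvFirst_pos _ _ _ hr
        simp [pvGoA, hi, hs, hr, (by omega : (1:Int) < i + 1)]
    · cases hrs : pvFirst "std::sort" rest <;>
        cases hri : pvFirst "include <algorithm>" rest <;>
          simp [pvGoA, hi, hs, ih (n + 1), hrs, hri]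
      · omega
      · split
        · simp
          omega
        · rfl

-- ===== VERDICT (by name: the statement is the Claim_ definition above) =====
theorem does_include_algorithm_spec : Claim_equal_does_include_algorithm := by
  intro lines fn _
  unfold Spec_does_include_algorithm does_include_algorithm does_include_algorithm_alt
  rw [pvGoA_false]
  cases hs : pvFirst "std::sort" lines with
  | none => cases hi : pvFirst "include <algorithm>" lines <;> simp
  | some s =>
    cases hi : pvFirst "include <algorithm>" lines with
    | none => simp
    | some i =>
      simp only []
      split
      · simp
      · rfl
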